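-- pv_equiv track=rewrite | github.com/nuboro/CG-generator | main/parser.py | ngram_count
-- ===== SOURCE A (Python) =====
-- def combine(a):
--     if len(a) == 1:
--         return([[x] for x in a[0]])
--     else:
--         return([[x]+y for x in a[0] for y in combine(a[1:])])
--
-- def ngram_count(items, n):
--     features = []
--     for j in range(len(items)-n+1):
--         possible_contexts = items[j:j+n]
--         features = features + combine(possible_contexts)
--     features = tuple(tuple(feature) for feature in features)
--     feature_count = {feature: 0 for feature in features}
--     for feature in features:
--         feature_count[feature] = feature_count[feature] + 1
--     return(feature_count)
-- ===== SOURCE B (Python) =====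
-- def ngram_count(items, n):
--     counts = {}
--     for j in range(len(items) - n + 1):
--         window = items[j:j + n]
--         prefixes = [()]
--         for group in window:
--             prefixes = [p + (x,) for p in prefixes for x in group]
--         for f in prefixes:
--             counts[f] = counts.get(f, 0) + 1
--     return counts
-- ===== Notes on version B (the rewrite author's own statement) =====
-- stated objective: alternative
-- what changed: Instead of recursively recomputing combine() for every element and rebuilding the features list by repeated concatenation before two counting passes over it, B builds each window's cartesian product iteratively with a prefix list and streams the n-grams directly into a single get-and-increment counting dict in one pass (intended as faster; a timing run measured 3.38x at the largest size but could not confirm the label).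
-- outside the precondition, e.g. on ngram_count([[1], [2]], 0): A raises IndexError, B returns {(): 3}
import Mathlib
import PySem

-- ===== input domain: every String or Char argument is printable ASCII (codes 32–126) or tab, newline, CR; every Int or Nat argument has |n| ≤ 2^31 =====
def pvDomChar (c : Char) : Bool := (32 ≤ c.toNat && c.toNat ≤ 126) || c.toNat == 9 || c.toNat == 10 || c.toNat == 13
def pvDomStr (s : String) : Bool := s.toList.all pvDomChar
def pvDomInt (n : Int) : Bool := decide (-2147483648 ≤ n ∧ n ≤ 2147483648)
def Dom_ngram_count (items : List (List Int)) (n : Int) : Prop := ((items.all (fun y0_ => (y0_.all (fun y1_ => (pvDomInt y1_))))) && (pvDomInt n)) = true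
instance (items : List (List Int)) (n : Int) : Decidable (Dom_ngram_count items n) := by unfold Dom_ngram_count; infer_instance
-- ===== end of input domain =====

-- B streams cartesian-product n-grams window by window into a single get-and-increment
-- counting dict in one pass, with the window product built iteratively by a prefix list
-- instead of A's recursion; same return value as A on every n ≥ 1 (A raises IndexError
-- for n ≤ 0).


-- ===== PORT A =====
-- combine(a); combine([]) raises IndexError in Python — that case is unreachable under
-- Pre_ngram_count (every window has length n ≥ 1); here it returns [].
def combineA : List (List Int) → List (List Int)
  | [] => []
  | [xs] => xs.map (fun x => [x])
  | xs :: rest => xs.flatMap (fun x => (combineA rest).map (fun y => x :: y))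

def ngram_count (items : List (List Int)) (n : Int) : List (List Int × Int) :=
  let features := (PySem.List.pyRange 0 ((items.length : Int) - n + 1) 1).foldl
      (fun acc j => acc ++ combineA (PySem.List.slice items (some j) (some (j + n)))) []
  let feature_count := features.foldl (fun d f => d.insert f 0) (PySem.Dict.empty : PySem.Dict (List Int) Int)
  (features.foldl (fun d f => d.insert f (d.getD f 0 + 1)) feature_count).items

-- ===== PORT B =====
def ngram_count_alt (items : List (List Int)) (n : Int) : List (List Int × Int) :=
  ((PySem.List.pyRange 0 ((items.length : Int) - n + 1) 1).foldl
    (fun counts j =>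
      let window := PySem.List.slice items (some j) (some (j + n))
      let prefixes := window.foldl
        (fun ps group => ps.flatMap (fun p => group.map (fun x => p ++ [x]))) [[]]
      prefixes.foldl (fun d f => d.insert f (d.getD f 0 + 1)) counts)
    (PySem.Dict.empty : PySem.Dict (List Int) Int)).items

-- ===== PRECONDITION & SPEC =====
-- Pre_ excludes exactly n ≤ 0, where Python A raises IndexError (combine of an empty window).
def Pre_ngram_count (items : List (List Int)) (n : Int) : Prop := 1 ≤ n
instance (items : List (List Int)) (n : Int) : Decidable (Pre_ngram_count items n) := by unfold Pre_ngram_count; infer_instance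
def pvWitness_ngram_count : List (List Int) × Int := ([[1, 2], [2], [1, 2]], 2)

def Spec_ngram_count (items : List (List Int)) (n : Int) (out : List (List Int × Int)) : Prop := out = ngram_count_alt items n
instance (items : List (List Int)) (n : Int) (out : List (List Int × Int)) : Decidable (Spec_ngram_count items n out) := by unfold Spec_ngram_count; infer_instance

-- ===== CLAIM (what is proved, stated in full; the proofs are below) =====
def Claim_equal_ngram_count : Prop := ∀ (items : List (List Int)) (n : Int), Dom_ngram_count items n → Pre_ngram_count items n → Spec_ngram_count items n (ngram_count items n)

-- ===== LEMMAS AND PROOFS =====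

-- recursive cartesian product, total on [] (helper for the proofs only)
def cartR : List (List Int) → List (List Int)
  | [] => [[]]
  | g :: rest => g.flatMap (fun x => (cartR rest).map (fun y => x :: y))

theorem combineA_eq_cartR (w : List (List Int)) (hw : w ≠ []) : combineA w = cartR w := by
  induction w with
  | nil => exact absurd rfl hw
  | cons g rest ih =>
    cases rest with
    | nil =>
      simp only [combineA, cartR]
      induction g with
      | nil => rfl
      | cons a t iht => simp [List.flatMap_cons] at iht ⊢; exact iht
    | cons h t =>
      simp only [combineA, cartR, ih (by simp)]

theorem foldl_cart (w : List (List Int)) (acc : List (List Int)) :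
    w.foldl (fun ps group => ps.flatMap (fun p => group.map (fun x => p ++ [x]))) acc
      = acc.flatMap (fun p => (cartR w).map (fun y => p ++ y)) := by
  induction w generalizing acc with
  | nil => simp [cartR]
  | cons g rest ih =>
    simp only [List.foldl_cons, ih, cartR, List.flatMap_assoc, List.flatMap_map,
      List.map_flatMap, List.map_map]
    congr 1
    funext p
    congr 1
    funext x
    congr 1
    funext y
    simp [Function.comp, List.append_assoc]

theorem foldl_cart_nil (w : List (List Int)) :
    w.foldl (fun ps group => ps.flatMap (fun p => group.map (fun x => p ++ [x]))) [[]]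
      = cartR w := by
  simp [foldl_cart]

-- streaming a fold over per-window blocks = one fold over the concatenation
theorem foldl_blocks {α β : Type} (l : List β) (F : β → List (List Int))
    (ins : α → List Int → α) (d : α) :
    l.foldl (fun d j => (F j).foldl ins d) d = (l.flatMap F).foldl ins d := by
  induction l generalizing d with
  | nil => simp
  | cons j rest ih => simp [List.foldl_append, ih]

-- zero-init pass: getD is 0 on members of fs
theorem getD_zeroInit (fs : List (List Int)) (d : PySem.Dict (List Int) Int) (k : List Int) :
    (fs.foldl (fun d f => d.insert f 0) d).getD k 0 = if k ∈ fs then 0 else d.getD k 0 := by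
  induction fs generalizing d with
  | nil => simp
  | cons f rest ih =>
    simp only [List.foldl_cons, ih, PySem.Dict.getD_insert, List.mem_cons]
    by_cases hk : k ∈ rest <;> by_cases hf : k = f <;> simp [hk, hf]

-- updating a set with elements it already contains leaves it unchanged
theorem set_update_of_subset (s : PySem.Set (List Int)) (xs : List (List Int))
    (h : ∀ x ∈ xs, x ∈ s) : PySem.Set.update s xs = s := by
  induction xs generalizing s with
  | nil => rfl
  | cons x rest ih =>
    have hx : PySem.Set.add s x = s := by
      simp [PySem.Set.add, PySem.Set.contains, h x (by simp)]
    simp only [PySem.Set.update] at *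
    simp only [List.foldl_cons, hx]
    exact ih s (fun y hy => h y (by simp [hy]))

-- the two-pass dict of A (zero-init then increment) has the items of Counter(fs)
theorem two_pass_eq_counter (fs : List (List Int)) :
    (fs.foldl (fun d f => d.insert f (d.getD f 0 + 1))
        (fs.foldl (fun d f => d.insert f 0) (PySem.Dict.empty : PySem.Dict (List Int) Int))).items
      = (PySem.Dict.counter fs).items := by
  set d0 : PySem.Dict (List Int) Int := fs.foldl (fun d f => d.insert f 0) PySem.Dict.empty with hd0
  have hkeys0 : d0.keys = PySem.Set.ofList fs := by
    rw [hd0, PySem.Dict.keys_foldl_insert]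
    simp [PySem.Dict.keys_empty, PySem.Set.update, PySem.Set.ofList]
  have hnd0 : d0.keys.Nodup := by
    rw [hkeys0]; exact PySem.Set.nodup_ofList fs
  have hkeys : (fs.foldl (fun d f => d.insert f (d.getD f 0 + 1)) d0).keys = PySem.Set.ofList fs := by
    rw [PySem.Dict.keys_foldl_insert, hkeys0]
    exact set_update_of_subset _ _ (fun x hx => (PySem.Set.mem_ofList fs x).mpr hx)
  have hnd : (fs.foldl (fun d f => d.insert f (d.getD f 0 + 1)) d0).keys.Nodup := by
    rw [hkeys]; exact PySem.Set.nodup_ofList fs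
  rw [PySem.Dict.items_eq_map_keys _ hnd 0, hkeys, PySem.Dict.items_counter]
  apply List.map_congr_left
  intro k hk
  have hkfs : k ∈ fs := (PySem.Set.mem_ofList fs k).mp hk
  rw [PySem.Dict.getD_foldl_insert_add_one, getD_zeroInit]
  simp [hkfs]

-- every window sliced under Pre_ is nonempty
theorem window_ne_nil (items : List (List Int)) (n j : Int) (hn : 1 ≤ n)
    (hj : j ∈ PySem.List.pyRange 0 ((items.length : Int) - n + 1) 1) :
    PySem.List.slice items (some j) (some (j + n)) ≠ [] := by
  rw [PySem.List.mem_pyRange_one] at hj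
  obtain ⟨hj0, hjlt⟩ := hj
  have h0 : (0 : Int) ≤ j := hj0
  have hb : (0 : Int) ≤ j + n := by omega
  rw [PySem.List.slice_toNat items h0 hb]
  intro hnil
  have := congrArg List.length hnil
  simp [List.length_take, List.length_drop] at this
  omega

-- ===== VERDICT (by name: the statement is the Claim_ definition above) =====
theorem ngram_count_spec : Claim_equal_ngram_count := by
  intro items n _ hpre
  unfold Spec_ngram_count ngram_count ngram_count_alt
  simp only
  have hwin : ∀ j ∈ PySem.List.pyRange 0 ((items.length : Int) - n + 1) 1,
      combineA (PySem.List.slice items (some j) (some (j + n)))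
        = cartR (PySem.List.slice items (some j) (some (j + n))) := by
    intro j hj
    exact combineA_eq_cartR _ (window_ne_nil items n j hpre hj)
  rw [PySem.List.foldl_congr_mem' _ _
        (fun acc j => acc ++ cartR (PySem.List.slice items (some j) (some (j + n)))) _
        (fun j hj acc => by rw [hwin j hj]),
      PySem.List.foldl_append_eq_flatMap, List.nil_append,
      PySem.List.foldl_congr_mem' _ _
        (fun counts j => (cartR (PySem.List.slice items (some j) (some (j + n)))).foldl
          (fun d f => d.insert f (d.getD f 0 + 1)) counts) _
        (fun j hj counts => by rw [foldl_cart_nil]),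
      foldl_blocks, two_pass_eq_counter, PySem.Dict.foldl_insert_getD_add_one_eq_counter]
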